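-- pv_equiv track=rewrite | github.com/epilectrik/voynich | phases/CAS_currier_a_schema/cas_nonblock_marker_scan.py | extract_markers_from_entries
-- ===== SOURCE A (Python) =====
-- from collections import defaultdict, Counter
--
-- def extract_markers_from_entries(entries, label):
--     """Extract marker tokens from a set of entries."""
--     marker_prefixes = ['ch', 'qo', 'sh', 'da', 'ok', 'ot', 'ct', 'ol']
--
--     marker_tokens = {prefix: Counter() for prefix in marker_prefixes}
--     entries_with_markers = 0
--     entries_without_markers = 0
--     marker_counts_per_entry = []
--
--     for entry in entries:
--         tokens = entry['tokens']
--         entry_markers = []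
--
--         for token in tokens:
--             if len(token) >= 2:
--                 prefix = token[:2]
--                 if prefix in marker_prefixes:
--                     marker_tokens[prefix][token] += 1
--                     entry_markers.append(token)
--
--         if entry_markers:
--             entries_with_markers += 1
--             marker_counts_per_entry.append(len(entry_markers))
--         else:
--             entries_without_markers += 1
--
--     return marker_tokens, entries_with_markers, entries_without_markers, marker_counts_per_entry
-- ===== SOURCE B (Python) =====
-- from collections import Counter
--
-- def extract_markers_from_entries(entries, label):
--     """Extract marker tokens from a set of entries (per-prefix grouping passes)."""
--     marker_prefixes = ['ch', 'qo', 'sh', 'da', 'ok', 'ot', 'ct', 'ol']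
--
--     # one closed-form pass per statistic, driven by per-entry marker counts
--     per_entry = [sum(1 for t in e['tokens'] if t[:2] in marker_prefixes)
--                  for e in entries]
--     entries_with_markers = sum(1 for n in per_entry if n)
--     entries_without_markers = len(entries) - entries_with_markers
--     marker_counts_per_entry = [n for n in per_entry if n]
--
--     # one grouping pass per prefix: each Counter is built independently
--     marker_tokens = {p: Counter(t for e in entries for t in e['tokens'] if t[:2] == p)
--                      for p in marker_prefixes}
--
--     return marker_tokens, entries_with_markers, entries_without_markers, marker_counts_per_entry
-- ===== Notes on version B (the rewrite author's own statement) =====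
-- stated objective: alternative
-- what changed: B drops A's single interleaved scan with shared mutable state: it computes per-entry marker counts as one list comprehension and derives entries_with/entries_without/marker_counts_per_entry from that list (entries_without by subtraction), and builds each prefix's Counter by its own independent filtering pass (Counter(...) per prefix) instead of A's per-token updates into a shared dict.
import Mathlib
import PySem

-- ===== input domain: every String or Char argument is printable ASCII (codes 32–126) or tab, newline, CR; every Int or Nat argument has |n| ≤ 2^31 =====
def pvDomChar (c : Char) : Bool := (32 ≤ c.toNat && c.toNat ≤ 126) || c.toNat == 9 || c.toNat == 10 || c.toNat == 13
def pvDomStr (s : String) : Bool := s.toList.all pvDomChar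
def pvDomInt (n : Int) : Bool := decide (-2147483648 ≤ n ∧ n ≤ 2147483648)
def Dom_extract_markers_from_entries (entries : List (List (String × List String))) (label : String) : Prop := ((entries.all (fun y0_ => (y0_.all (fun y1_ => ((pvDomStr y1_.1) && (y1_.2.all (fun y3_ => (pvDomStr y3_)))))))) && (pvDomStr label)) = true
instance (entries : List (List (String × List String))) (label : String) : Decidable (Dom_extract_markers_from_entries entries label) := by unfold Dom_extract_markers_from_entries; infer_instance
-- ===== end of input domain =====

-- B replaces A's single interleaved scan by independent grouping passes (per-entry marker
-- counts drive the three statistics; each prefix's Counter is built by its own pass); same cost.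

-- shared vocabulary of both Pythons
def pvPrefixes : List String := ["ch", "qo", "sh", "da", "ok", "ot", "ct", "ol"]

-- ===== PORT A =====
-- marker_tokens = {prefix: Counter() for prefix in marker_prefixes}
def pvInitMT : PySem.Dict String (PySem.Dict String Int) :=
  pvPrefixes.foldl (fun d p => d.insert p PySem.Dict.empty) PySem.Dict.empty

-- inner loop body of A: if len(token) >= 2 and token[:2] in marker_prefixes: bump; append
def pvStepTokA (q : PySem.Dict String (PySem.Dict String Int) × List String) (t : String) :
    PySem.Dict String (PySem.Dict String Int) × List String :=
  if 2 ≤ PySem.Str.len t then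
    if pvPrefixes.contains (PySem.Str.slice t none (some 2)) then
      (q.1.modify (PySem.Str.slice t none (some 2)) PySem.Dict.empty
         (fun c => c.modify t 0 (· + 1)),
       q.2 ++ [t])
    else q
  else q

-- outer loop body of A (entry['tokens'] via first-match lookup; the KeyError case is excluded by Pre_)
def pvStepEntryA (st : PySem.Dict String (PySem.Dict String Int) × Int × Int × List Int)
    (entry : List (String × List String)) :
    PySem.Dict String (PySem.Dict String Int) × Int × Int × List Int :=
  let tokens := (PySem.Dict.mk entry).getD "tokens" []
  let inner := tokens.foldl pvStepTokA (st.1, [])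
  if inner.2 ≠ [] then (inner.1, st.2.1 + 1, st.2.2.1, st.2.2.2 ++ [(inner.2.length : Int)])
  else (inner.1, st.2.1, st.2.2.1 + 1, st.2.2.2)

def extract_markers_from_entries (entries : List (List (String × List String))) (label : String) :
    (List (String × List (String × Int))) × Int × Int × List Int :=
  let st := entries.foldl pvStepEntryA (pvInitMT, 0, 0, [])
  (st.1.items.map (fun p => (p.1, p.2.items)), st.2.1, st.2.2.1, st.2.2.2)

-- ===== PORT B =====
-- per_entry = [sum(1 for t in e['tokens'] if t[:2] in marker_prefixes) for e in entries]
def pvPerEntry (entries : List (List (String × List String))) : List Int :=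
  entries.map (fun e =>
    ((((PySem.Dict.mk e).getD "tokens" []).countP
        (fun t => pvPrefixes.contains (PySem.Str.slice t none (some 2)))) : Int))

-- Counter(t for e in entries for t in e['tokens'] if t[:2] == p)
def pvCounterFor (entries : List (List (String × List String))) (p : String) :
    PySem.Dict String Int :=
  PySem.Dict.counter
    ((entries.flatMap (fun e => (PySem.Dict.mk e).getD "tokens" [])).filter
      (fun t => PySem.Str.slice t none (some 2) == p))

def extract_markers_from_entries_alt (entries : List (List (String × List String))) (label : String) :
    (List (String × List (String × Int))) × Int × Int × List Int :=
  let perEntry := pvPerEntry entries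
  let withM : Int := (perEntry.countP (fun n => n ≠ 0) : Int)
  let withoutM : Int := (entries.length : Int) - withM
  let counts := perEntry.filter (fun n => n ≠ 0)
  (pvPrefixes.map (fun p => (p, (pvCounterFor entries p).items)), withM, withoutM, counts)

-- ===== PRECONDITION & SPEC =====
-- Pre_ excludes exactly the entries without a 'tokens' key, on which Python A raises KeyError.
def Pre_extract_markers_from_entries (entries : List (List (String × List String))) (label : String) : Prop :=
  ∀ entry ∈ entries, (PySem.Dict.mk entry).contains "tokens" = true
instance (entries : List (List (String × List String))) (label : String) : Decidable (Pre_extract_markers_from_entries entries label) := by unfold Pre_extract_markers_from_entries; infer_instance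

def pvWitness_extract_markers_from_entries : (List (List (String × List String))) × String :=
  ([[("tokens", ["chedy", "x"])], [("tokens", [])]], "A")

def Spec_extract_markers_from_entries (entries : List (List (String × List String))) (label : String) (out : (List (String × List (String × Int))) × Int × Int × List Int) : Prop := out = extract_markers_from_entries_alt entries label
instance (entries : List (List (String × List String))) (label : String) (out : (List (String × List (String × Int))) × Int × Int × List Int) : Decidable (Spec_extract_markers_from_entries entries label out) := by unfold Spec_extract_markers_from_entries; infer_instance

-- ===== CLAIM (what is proved, stated in full; the proofs are below) =====
def Claim_equal_extract_markers_from_entries : Prop := ∀ (entries : List (List (String × List String))) (label : String), Dom_extract_markers_from_entries entries label → Pre_extract_markers_from_entries entries label → Spec_extract_markers_from_entries entries label (extract_markers_from_entries entries label)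

-- ===== LEMMAS AND PROOFS =====

-- helper definitions for the proofs (not part of either port)
-- the marker list of one entry, B's filter view of A's inner loop
def pvMarkers (e : List (String × List String)) : List String :=
  ((PySem.Dict.mk e).getD "tokens" []).filter
    (fun t => pvPrefixes.contains (PySem.Str.slice t none (some 2)))

-- the per-token Counter update both Pythons perform on a marker
def pvBump (d : PySem.Dict String (PySem.Dict String Int)) (t : String) :
    PySem.Dict String (PySem.Dict String Int) :=
  d.modify (PySem.Str.slice t none (some 2)) PySem.Dict.empty (fun c => c.modify t 0 (· + 1))

-- A's guard 'len(t) >= 2 and t[:2] in marker_prefixes' equals B's 't[:2] in marker_prefixes':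
-- a string shorter than 2 chars never equals one of the 2-char prefixes.
lemma pvCondEq (t : String) :
    ((decide (2 ≤ PySem.Str.len t)) && pvPrefixes.contains (PySem.Str.slice t none (some 2)))
      = pvPrefixes.contains (PySem.Str.slice t none (some 2)) := by
  by_cases h : 2 ≤ PySem.Str.len t
  · rw [decide_eq_true h, Bool.true_and]
  · have hc : pvPrefixes.contains (PySem.Str.slice t none (some 2)) = false := by
      cases hb : pvPrefixes.contains (PySem.Str.slice t none (some 2)) with
      | false => rfl
      | true =>
        exfalso
        have hmem := List.mem_of_elem_eq_true hb
        have hall : ∀ p ∈ pvPrefixes, p.toList.length = 2 := by decide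
        have h2 : (PySem.Str.slice t none (some 2)).toList.length = 2 :=
          hall _ hmem
        simp only [PySem.Str.len_eq] at h
        have hlen : t.toList.length < 2 := by omega
        have hs : (PySem.Str.slice t none (some 2)).toList = t.toList := by
          rw [PySem.Str.toList_slice]
          rw [show PySem.Chars.slice t.toList none (some 2)
                = PySem.List.slice t.toList none (some 2) from rfl]
          rw [PySem.List.slice_to (xs := t.toList) (b := 2) (by norm_num)]
          exact List.take_of_length_le (by omega)
        rw [hs] at h2
        omega
    rw [hc, Bool.and_false]

-- A's inner token loop: bump every marker, collect the markers
lemma pvInnerA (tk : List String) (mt : PySem.Dict String (PySem.Dict String Int)) (em : List String) :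
    tk.foldl pvStepTokA (mt, em)
      = ((tk.filter (fun t => pvPrefixes.contains (PySem.Str.slice t none (some 2)))).foldl
           pvBump mt,
         em ++ tk.filter (fun t => pvPrefixes.contains (PySem.Str.slice t none (some 2)))) := by
  induction tk generalizing mt em with
  | nil => simp
  | cons t tk ih =>
    rw [List.foldl_cons, List.filter_cons]
    by_cases h2 : pvPrefixes.contains (PySem.Str.slice t none (some 2)) = true
    · have h1 : 2 ≤ PySem.Str.len t := by
        have hc := pvCondEq t
        rw [h2, Bool.and_true] at hc
        exact of_decide_eq_true hc
      rw [if_pos h2]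
      show List.foldl pvStepTokA (pvStepTokA (mt, em) t) tk = _
      rw [show pvStepTokA (mt, em) t = (pvBump mt t, em ++ [t]) by
            unfold pvStepTokA pvBump; rw [if_pos h1, if_pos h2]]
      rw [ih, List.foldl_cons, List.append_assoc, List.singleton_append]
    · have h2f : pvPrefixes.contains (PySem.Str.slice t none (some 2)) = false := by
        simpa using h2
      rw [if_neg h2]
      show List.foldl pvStepTokA (pvStepTokA (mt, em) t) tk = _
      rw [show pvStepTokA (mt, em) t = (mt, em) by
            unfold pvStepTokA
            by_cases h1 : 2 ≤ PySem.Str.len t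
            · rw [if_pos h1, if_neg h2]
            · rw [if_neg h1]]
      exact ih mt em

-- A's outer loop in closed form: all bumps over the flat marker list, plus the three statistics
lemma pvOuterA (entries : List (List (String × List String)))
    (mt : PySem.Dict String (PySem.Dict String Int)) (w o : Int) (c : List Int) :
    entries.foldl pvStepEntryA (mt, w, o, c)
      = ((entries.flatMap pvMarkers).foldl pvBump mt,
         w + ((pvPerEntry entries).countP (fun n => n ≠ 0) : Int),
         o + ((entries.length : Int) - ((pvPerEntry entries).countP (fun n => n ≠ 0) : Int)),
         c ++ (pvPerEntry entries).filter (fun n => n ≠ 0)) := by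
  induction entries generalizing mt w o c with
  | nil => simp [pvPerEntry]
  | cons e es ih =>
    have hcnt : pvPerEntry (e :: es) = ((pvMarkers e).length : Int) :: pvPerEntry es := by
      simp only [pvPerEntry, List.map_cons, pvMarkers, List.countP_eq_length_filter]
    rw [List.foldl_cons, List.flatMap_cons, List.foldl_append, hcnt]
    have hstep : pvStepEntryA (mt, w, o, c) e
        = ((pvMarkers e).foldl pvBump mt,
           if pvMarkers e = [] then (w, o + 1, c)
           else (w + 1, o, c ++ [((pvMarkers e).length : Int)])) := by
      simp only [pvStepEntryA, pvInnerA, List.nil_append]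
      have fold : (((PySem.Dict.mk e).getD "tokens" []).filter
          (fun t => pvPrefixes.contains (PySem.Str.slice t none (some 2)))) = pvMarkers e := rfl
      rw [fold]
      by_cases h : pvMarkers e = []
      · rw [if_neg (by simp [h]), if_pos h]
      · rw [if_pos h, if_neg h]
    rw [hstep]
    by_cases h : pvMarkers e = []
    · rw [if_pos h, ih]
      have h0 : ((pvMarkers e).length : Int) = 0 := by rw [h]; rfl
      have hc1 : ((((pvMarkers e).length : Int) :: pvPerEntry es).countP (fun n => n ≠ 0))
          = ((pvPerEntry es).countP (fun n => n ≠ 0)) := by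
        rw [List.countP_cons]; simp [h0]
      have hf1 : ((((pvMarkers e).length : Int) :: pvPerEntry es).filter (fun n => n ≠ 0))
          = ((pvPerEntry es).filter (fun n => n ≠ 0)) := by
        rw [List.filter_cons]; simp [h0]
      rw [hc1, hf1, List.length_cons]
      simp only [Prod.mk.injEq]
      refine ⟨?_, ?_, ?_, ?_⟩ <;> first | trivial | (push_cast; ring)
    · rw [if_neg h, ih]
      have hne : ((pvMarkers e).length : Int) ≠ 0 := by
        simpa [List.length_eq_zero_iff] using h
      have hc2 : ((((pvMarkers e).length : Int) :: pvPerEntry es).countP (fun n => n ≠ 0))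
          = ((pvPerEntry es).countP (fun n => n ≠ 0)) + 1 := by
        rw [List.countP_cons]; simp [h]
      have hf2 : ((((pvMarkers e).length : Int) :: pvPerEntry es).filter (fun n => n ≠ 0))
          = ((pvMarkers e).length : Int) :: (pvPerEntry es).filter (fun n => n ≠ 0) := by
        rw [List.filter_cons]; simp [h]
      rw [hc2, hf2, List.length_cons]
      simp only [Prod.mk.injEq]
      refine ⟨?_, ?_, ?_, ?_⟩
      · trivial
      · push_cast; ring
      · push_cast; ring
      · simp only [List.append_assoc, List.singleton_append]

-- keys are invariant under the bump loop (every bumped prefix is already a key)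
lemma pvKeysBump (L : List String) (d : PySem.Dict String (PySem.Dict String Int))
    (h : ∀ t ∈ L, PySem.Str.slice t none (some 2) ∈ d.keys) :
    (L.foldl pvBump d).keys = d.keys := by
  induction L generalizing d with
  | nil => rfl
  | cons t L ih =>
    have hk : (pvBump d t).keys = d.keys := by
      rw [pvBump, PySem.Dict.keys_modify, PySem.Dict.keys_insert_of_contains]
      rw [PySem.Dict.contains_iff_mem_keys]
      exact h t (by simp)
    rw [List.foldl_cons, ih (pvBump d t) (by intro u hu; rw [hk]; exact h u (by simp [hu])), hk]

-- lookup of one prefix after the bump loop: the per-prefix counter loop over the filtered list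
lemma pvGetDBump (L : List String) (d : PySem.Dict String (PySem.Dict String Int)) (p : String) :
    (L.foldl pvBump d).getD p PySem.Dict.empty
      = ((L.filter (fun t => PySem.Str.slice t none (some 2) == p)).foldl
          (fun c t => c.modify t 0 (· + 1)) (d.getD p PySem.Dict.empty)) := by
  induction L generalizing d with
  | nil => rfl
  | cons t L ih =>
    rw [List.foldl_cons, ih, List.filter_cons]
    by_cases h : PySem.Str.slice t none (some 2) = p
    · rw [if_pos (by simp [h]), List.foldl_cons]
      congr 1
      rw [pvBump, h, PySem.Dict.getD_modify]
      simp
    · rw [if_neg (by simpa using h)]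
      congr 1
      rw [pvBump, PySem.Dict.getD_modify]
      simp [Ne.symm h]

-- the flat marker list filtered to one real prefix is the flat token list filtered to it
lemma pvFilterMarkers (entries : List (List (String × List String))) (p : String)
    (hp : p ∈ pvPrefixes) :
    ((entries.flatMap pvMarkers).filter (fun t => PySem.Str.slice t none (some 2) == p))
      = ((entries.flatMap (fun e => (PySem.Dict.mk e).getD "tokens" [])).filter
          (fun t => PySem.Str.slice t none (some 2) == p)) := by
  rw [List.filter_flatMap, List.filter_flatMap]
  apply List.flatMap_congr
  intro e _
  rw [pvMarkers, List.filter_filter]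
  apply List.filter_congr
  intro t _
  by_cases h : PySem.Str.slice t none (some 2) = p
  · have hc : pvPrefixes.contains (PySem.Str.slice t none (some 2)) = true := by
      rw [h]; exact List.elem_eq_true_of_mem hp
    rw [hc]
    simp [h]
  · have hf : (PySem.Str.slice t none (some 2) == p) = false := by simpa using h
    rw [hf, Bool.false_and]

-- ===== VERDICT (by name: the statement is the Claim_ definition above) =====
theorem extract_markers_from_entries_spec : Claim_equal_extract_markers_from_entries := by
  intro entries label _ _
  unfold Spec_extract_markers_from_entries extract_markers_from_entries extract_markers_from_entries_alt
  rw [pvOuterA]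
  simp only [zero_add, List.nil_append]
  refine Prod.ext ?_ rfl
  -- the dict component
  have hkeys0 : pvInitMT.keys = pvPrefixes := by decide
  have hmem : ∀ t ∈ entries.flatMap pvMarkers, PySem.Str.slice t none (some 2) ∈ pvInitMT.keys := by
    intro t ht
    rw [hkeys0]
    obtain ⟨e, -, ht⟩ := List.mem_flatMap.mp ht
    simp only [pvMarkers] at ht
    have hpt := List.of_mem_filter ht
    simpa using hpt
  have hkeys : ((entries.flatMap pvMarkers).foldl pvBump pvInitMT).keys = pvPrefixes := by
    rw [pvKeysBump _ _ hmem, hkeys0]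
  have hnd : ((entries.flatMap pvMarkers).foldl pvBump pvInitMT).keys.Nodup := by
    rw [hkeys]; decide
  show (((entries.flatMap pvMarkers).foldl pvBump pvInitMT).items.map
      (fun p => (p.1, p.2.items))) = _
  rw [PySem.Dict.items_eq_map_keys _ hnd PySem.Dict.empty, hkeys, List.map_map]
  show _ = List.map (fun p => (p, (pvCounterFor entries p).items)) pvPrefixes
  apply List.map_congr_left
  intro p hp
  simp only [Function.comp_apply]
  congr 1
  rw [pvGetDBump, pvFilterMarkers entries p hp, pvCounterFor, PySem.Dict.counter_eq_foldl]
  have h0 : pvInitMT.getD p PySem.Dict.empty = PySem.Dict.empty := by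
    fin_cases hp <;> rfl
  rw [h0]
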